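-- pv_equiv track=rewrite | github.com/Kalana777/Blast_simulator | my_blast.py | hsp
-- ===== SOURCE A (Python) =====
-- def hsp(query_words_seq, target_words_seq):
--
--     score_matrix =[]
--     for i in range(0, len(query_words_seq)):
--         # for each matching word, in both the query and databse sequence, we record the offset and the positions (indexes) of the word
--         for j in range(0, len(target_words_seq)):
--             if query_words_seq[i] == target_words_seq[j]:
--                 offset = j - i
--                 query_index = i
--                 db_seq_index = j
--                 score_matrix.append([offset,i,j])
--
--     return score_matrix
-- ===== SOURCE B (Python) =====
-- def hsp(query_words_seq, target_words_seq):
--     # Index each target word to its list of positions, then one lookup per query word.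
--     index = {}
--     for j, w in enumerate(target_words_seq):
--         index.setdefault(w, []).append(j)
--     score_matrix = []
--     for i, w in enumerate(query_words_seq):
--         for j in index.get(w, []):
--             score_matrix.append([j - i, i, j])
--     return score_matrix
-- ===== Notes on version B (the rewrite author's own statement) =====
-- stated objective: alternative
-- what changed: Replaced the nested scan of the target list for every query word by a one-pass hash index from target word to its positions, looked up once per query word; intended as faster on sparse matches (measured only 1.31x at n=1024 on a timing run's match-heavy inputs, where the output itself is Theta(n*m)).
import Mathlib
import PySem

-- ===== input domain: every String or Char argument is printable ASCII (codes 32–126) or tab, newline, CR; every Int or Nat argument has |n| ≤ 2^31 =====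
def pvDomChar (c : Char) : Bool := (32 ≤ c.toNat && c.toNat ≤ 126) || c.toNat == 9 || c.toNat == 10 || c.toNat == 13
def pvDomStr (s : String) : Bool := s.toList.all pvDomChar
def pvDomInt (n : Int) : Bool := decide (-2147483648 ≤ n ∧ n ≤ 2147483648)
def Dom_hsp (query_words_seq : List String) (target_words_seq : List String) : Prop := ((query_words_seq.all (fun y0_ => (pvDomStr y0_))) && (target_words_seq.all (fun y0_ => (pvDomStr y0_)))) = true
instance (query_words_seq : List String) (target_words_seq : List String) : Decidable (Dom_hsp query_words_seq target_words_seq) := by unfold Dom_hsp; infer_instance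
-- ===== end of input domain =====

-- B replaces A's nested scan by a hash index from target word to its positions (objective: alternative; O(n+m+matches) work vs O(n*m), not confirmed faster on the timing inputs).

-- ===== PORT A =====
def hsp (query_words_seq : List String) (target_words_seq : List String) : List (List Int) :=
  (PySem.List.pyRange 0 (query_words_seq.length : Int)).foldl (fun score_matrix i =>
    (PySem.List.pyRange 0 (target_words_seq.length : Int)).foldl (fun sm j =>
      if PySem.List.pyGetD query_words_seq i "" == PySem.List.pyGetD target_words_seq j "" then
        sm ++ [[j - i, i, j]]
      else sm) score_matrix) []

-- ===== PORT B =====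
-- index = {}; for j, w in enumerate(target_words_seq): index.setdefault(w, []).append(j)
def hspIndex (target_words_seq : List String) : PySem.Dict String (List Int) :=
  (PySem.List.enumerate target_words_seq).foldl
    (fun index p => index.modify p.2 [] (fun l => l ++ [p.1])) PySem.Dict.empty

def hsp_alt (query_words_seq : List String) (target_words_seq : List String) : List (List Int) :=
  let index := hspIndex target_words_seq
  (PySem.List.enumerate query_words_seq).foldl (fun score_matrix p =>
    (index.getD p.2 []).foldl (fun sm j => sm ++ [[j - p.1, p.1, j]]) score_matrix) []

-- ===== PRECONDITION & SPEC =====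
def Spec_hsp (query_words_seq : List String) (target_words_seq : List String) (out : List (List Int)) : Prop := out = hsp_alt query_words_seq target_words_seq
instance (query_words_seq : List String) (target_words_seq : List String) (out : List (List Int)) : Decidable (Spec_hsp query_words_seq target_words_seq out) := by unfold Spec_hsp; infer_instance

-- ===== CLAIM (what is proved, stated in full; the proofs are below) =====
def Claim_equal_hsp : Prop := ∀ (query_words_seq : List String) (target_words_seq : List String), Dom_hsp query_words_seq target_words_seq → Spec_hsp query_words_seq target_words_seq (hsp query_words_seq target_words_seq)

-- ===== LEMMAS AND PROOFS =====

-- members of enumerate xs s carry their own list element: pyGetD xs (p.1 - s) d = p.2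
theorem pv_enum_getD {α : Type} [Inhabited α] (xs : List α) (d : α) :
    ∀ (s : Int) (p : Int × α), p ∈ PySem.List.enumerate xs s →
      s ≤ p.1 ∧ PySem.List.pyGetD xs (p.1 - s) d = p.2 := by
  induction xs with
  | nil => intro s p hp; simp [PySem.List.enumerate_nil] at hp
  | cons x xs ih =>
    intro s p hp
    rw [PySem.List.enumerate_cons] at hp
    rcases List.mem_cons.1 hp with h | h
    · subst h
      refine ⟨le_refl _, ?_⟩
      rw [PySem.List.pyGetD_eq_getElem _ _ (by omega) (by simp)]
      simp
    · obtain ⟨h1, h2⟩ := ih (s + 1) p h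
      refine ⟨by omega, ?_⟩
      rw [PySem.List.pyGetD_of_nonneg _ _ (by omega)] at h2 ⊢
      have hgt : (p.1 - s).toNat = (p.1 - (s + 1)).toNat + 1 := by omega
      rw [hgt, List.getD_cons_succ]
      exact h2

-- the looked-up index list is exactly the positions of w in the target list
theorem pv_hspIndex_getD (t : List String) (w : String) :
    (hspIndex t).getD w [] =
      ((PySem.List.enumerate t).filter (fun r => r.2 == w)).map (fun r => r.1) := by
  unfold hspIndex
  have : (PySem.List.enumerate t).foldl
      (fun index p => index.modify p.2 [] (fun l => l ++ [p.1])) PySem.Dict.empty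
      = ((PySem.List.enumerate t).map Prod.swap).foldl
        (fun d p => d.modify p.1 [] (fun l => l ++ [p.2])) PySem.Dict.empty := by
    rw [List.foldl_map]
    rfl
  rw [this, PySem.Dict.getD_foldl_modify_append]
  simp [List.filter_map, Function.comp_def, Prod.swap]

-- A's inner scan over the whole target list, rephrased over enumerate
theorem pv_innerA (t : List String) (w : String) (i : Int) (acc : List (List Int)) :
    (PySem.List.pyRange 0 (t.length : Int)).foldl (fun sm j =>
        if w == PySem.List.pyGetD t j "" then sm ++ [[j - i, i, j]] else sm) acc
      = acc ++ ((PySem.List.enumerate t).filter (fun r => r.2 == w)).map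
          (fun r => [r.1 - i, i, r.1]) := by
  have hr : PySem.List.pyRange 0 (t.length : Int) =
      (PySem.List.enumerate t).map (fun p => p.1) := by
    rw [PySem.List.map_fst_enumerate]; norm_num
  rw [hr, List.foldl_map]
  have hcongr : (PySem.List.enumerate t).foldl
      (fun sm p => if w == PySem.List.pyGetD t p.1 "" then sm ++ [[p.1 - i, i, p.1]] else sm) acc
      = (PySem.List.enumerate t).foldl
      (fun sm p => if (fun r : Int × String => r.2 == w) p then sm ++ [[p.1 - i, i, p.1]] else sm) acc := by
    apply PySem.List.foldl_congr_mem
    intro a p hp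
    have h2 := (pv_enum_getD t "" 0 p hp).2
    rw [sub_zero] at h2
    simp only [h2, beq_iff_eq]
    by_cases h : w = p.2 <;> simp [h, eq_comm]
  rw [hcongr, PySem.List.foldl_append_if]

theorem hsp_eq (q t : List String) : hsp q t = hsp_alt q t := by
  unfold hsp hsp_alt
  have hr : PySem.List.pyRange 0 (q.length : Int) =
      (PySem.List.enumerate q).map (fun p => p.1) := by
    rw [PySem.List.map_fst_enumerate]; norm_num
  rw [hr, List.foldl_map]
  apply PySem.List.foldl_congr_mem
  intro acc p hp
  have h2 := (pv_enum_getD q "" 0 p hp).2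
  rw [sub_zero] at h2
  simp only [h2]
  rw [pv_innerA, PySem.List.foldl_append_singleton_eq_map, pv_hspIndex_getD, List.map_map]
  rfl

-- ===== VERDICT (by name: the statement is the Claim_ definition above) =====
theorem hsp_spec : Claim_equal_hsp := by
  intro q t _
  exact hsp_eq q t
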